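-- pv_equiv track=rewrite | github.com/desertwind77/interview | misc/max_population.py | find_min_max_birth_year
-- ===== SOURCE A (Python) =====
-- def find_min_max_birth_year( data ):
--    # time = O( n )
--    minBirthYear = maxBirthYear = None
--    for ( birth, _ ) in data:
--       if minBirthYear == None or birth < minBirthYear:
--          minBirthYear = birth
--       if maxBirthYear == None or birth > maxBirthYear:
--          maxBirthYear = birth
--
--    return ( minBirthYear, maxBirthYear )
-- ===== SOURCE B (Python) =====
-- def find_min_max_birth_year(data):
--     if not data:
--         return (None, None)
--     births = [birth for (birth, _) in data]
--     return (min(births), max(births))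
-- ===== Notes on version B (the rewrite author's own statement) =====
-- stated objective: idiomatic
-- what changed: Replaces the single fused loop with Option-typed running min/max accumulators by an empty-input guard, a one-pass projection of birth years, and the builtins min/max (two separate scans).
import Mathlib
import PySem

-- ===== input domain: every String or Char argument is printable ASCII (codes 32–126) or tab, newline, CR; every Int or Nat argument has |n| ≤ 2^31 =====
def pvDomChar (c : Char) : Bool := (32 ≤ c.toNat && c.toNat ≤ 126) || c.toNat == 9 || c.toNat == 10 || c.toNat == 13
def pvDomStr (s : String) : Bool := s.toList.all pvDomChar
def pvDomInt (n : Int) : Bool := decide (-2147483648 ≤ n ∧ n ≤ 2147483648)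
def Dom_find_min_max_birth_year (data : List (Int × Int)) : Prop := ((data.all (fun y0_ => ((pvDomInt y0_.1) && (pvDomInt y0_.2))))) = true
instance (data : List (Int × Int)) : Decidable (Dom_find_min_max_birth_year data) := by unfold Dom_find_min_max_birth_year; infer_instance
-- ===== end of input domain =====

-- B guards the empty case and uses min/max over the projected birth years instead of A's fused Option-accumulator loop; objective: idiomatic.


-- ===== PORT A =====
-- loop body: A's two independent `if`s, in order (Python's `or` short-circuits the None test)
def pvStepA (acc : Option Int × Option Int) (p : Int × Int) : Option Int × Option Int :=
  let birth := p.1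
  let mn := match acc.1 with
    | none => some birth
    | some m => if birth < m then some birth else some m
  let mx := match acc.2 with
    | none => some birth
    | some m => if birth > m then some birth else some m
  (mn, mx)

def find_min_max_birth_year (data : List (Int × Int)) : Option Int × Option Int :=
  data.foldl pvStepA (none, none)

-- ===== PORT B =====
def find_min_max_birth_year_alt (data : List (Int × Int)) : Option Int × Option Int :=
  if data.isEmpty then (none, none)
  else
    let births := data.map (fun p => p.1)
    (PySem.List.min? births (fun x => x), PySem.List.max? births (fun x => x))

-- ===== PRECONDITION & SPEC =====
def Spec_find_min_max_birth_year (data : List (Int × Int)) (out : Option Int × Option Int) : Prop := out = find_min_max_birth_year_alt data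
instance (data : List (Int × Int)) (out : Option Int × Option Int) : Decidable (Spec_find_min_max_birth_year data out) := by unfold Spec_find_min_max_birth_year; infer_instance

-- ===== CLAIM (what is proved, stated in full; the proofs are below) =====
def Claim_equal_find_min_max_birth_year : Prop := ∀ (data : List (Int × Int)), Dom_find_min_max_birth_year data → Spec_find_min_max_birth_year data (find_min_max_birth_year data)

-- ===== LEMMAS AND PROOFS =====
theorem pvStepA_some (m M : Int) (p : Int × Int) :
    pvStepA (some m, some M) p = (some (min m p.1), some (max M p.1)) := by
  simp only [pvStepA, Prod.mk.injEq]
  constructor <;> split <;> simp <;> omega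

theorem pvLoop_some (l : List (Int × Int)) : ∀ (m M : Int),
    l.foldl pvStepA (some m, some M)
      = (some ((l.map (fun p => p.1)).foldl min m), some ((l.map (fun p => p.1)).foldl max M)) := by
  induction l with
  | nil => intro m M; simp
  | cons h t ih =>
      intro m M
      simp only [List.foldl_cons, List.map_cons, pvStepA_some, ih]

theorem find_min_max_birth_year_spec : Claim_equal_find_min_max_birth_year := by
  intro data _
  unfold Spec_find_min_max_birth_year find_min_max_birth_year find_min_max_birth_year_alt
  cases data with
  | nil => simp
  | cons h t =>
      simp only [List.isEmpty_cons, Bool.false_eq_true, if_false, List.map_cons,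
        PySem.List.min?_id_cons, PySem.List.max?_id_cons, List.foldl_cons]
      have hstep : pvStepA (none, none) h = (some h.1, some h.1) := rfl
      rw [hstep, pvLoop_some]
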